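-- pv_equiv track=rewrite | github.com/bunburya/stss_dataviz | app/fetch_data.py | check_isin
-- ===== SOURCE A (Python) =====
-- def check_isin(isin: str) -> bool:
--     isin = list(isin.upper())
--     checkdigit = int(isin.pop())
--     # Replace country code characters with numbers
--     for i, char in enumerate(isin):
--         char_pos = ord(char)
--         if char_pos in range(65, 91):
--             isin[i] = str(ord(char) - 55)
--     isin = [int(i) for i in ''.join(isin)]
--     # These are considered "odd" and "even" based on a 1-based index
--     odd_chars = isin[::2]
--     even_chars = isin[1::2]
--     if len(isin) % 2:
--         # Odd number of characters
--         odd_chars = [int(c) for c in ''.join([str(i*2) for i in odd_chars])]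
--     else:
--         # Even number of characters
--         even_chars = [int(c) for c in ''.join([str(i*2) for i in even_chars])]
--     sum_digits = sum(odd_chars + even_chars)
--     mod10 = sum_digits % 10
--     return ((10 - mod10) % 10) == checkdigit
-- ===== SOURCE B (Python) =====
-- def check_isin(isin: str) -> bool:
--     s = isin.upper()
--     check = int(s[-1])
--     digits = []
--     for ch in s[:-1]:
--         if 'A' <= ch <= 'Z':
--             v = ord(ch) - 55
--             digits.append(v // 10)
--             digits.append(v % 10)
--         else:
--             digits.append(int(ch))
--     total = 0
--     double = True
--     for d in reversed(digits):
--         if double: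
--             d *= 2
--             if d > 9:
--                 d -= 9
--         total += d
--         double = not double
--     return (10 - total % 10) % 10 == check
-- ===== Notes on version B (the rewrite author's own statement) =====
-- stated objective: simpler
-- what changed: B replaces A's even/odd slicing, length-parity branch and str-join/re-split digit doubling with one right-to-left pass over the expanded digit sequence that doubles alternate digits via d*2-9; Pre_ excludes only inputs where A raises (empty string, or a character int() rejects).
import Mathlib
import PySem

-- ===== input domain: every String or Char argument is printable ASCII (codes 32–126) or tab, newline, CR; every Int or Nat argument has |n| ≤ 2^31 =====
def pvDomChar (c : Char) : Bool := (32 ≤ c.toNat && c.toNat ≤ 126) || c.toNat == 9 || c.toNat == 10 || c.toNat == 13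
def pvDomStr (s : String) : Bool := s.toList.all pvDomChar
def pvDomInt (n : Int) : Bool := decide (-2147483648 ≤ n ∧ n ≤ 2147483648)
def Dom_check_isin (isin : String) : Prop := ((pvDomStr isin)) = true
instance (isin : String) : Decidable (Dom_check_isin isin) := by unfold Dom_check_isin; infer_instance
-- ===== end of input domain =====

-- B replaces A's [::2]/[1::2] slicing, length-parity branch and str-join/re-split doubling by a single
-- right-to-left pass over the expanded digits (simpler; same return values and same raising inputs).

-- ===== PORT A =====
-- hand port of the extended slice xs[::2] (elements at even indices, in order; exact)
def pvEveryOther : List Int → List Int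
  | [] => []
  | [a] => [a]
  | a :: _ :: t => a :: pvEveryOther t

def check_isin (isin : String) : Bool :=
  -- isin = list(isin.upper())
  let l := PySem.Chars.upper isin.toList
  -- checkdigit = int(isin.pop())  (IndexError on empty, ValueError on a non-digit: outside Pre_)
  match PySem.List.pop? l with
  | none => false
  | some (lastc, rest) =>
    match PySem.Int.ofChars? [lastc] with
    | none => false
    | some checkdigit =>
      -- for i, char in enumerate(isin): if ord(char) in range(65, 91): isin[i] = str(ord(char) - 55)
      let repl : List (List Char) :=
        rest.map (fun c =>
          if 65 ≤ c.toNat ∧ c.toNat < 91 then PySem.Int.toChars ((c.toNat : Int) - 55) else [c])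
      -- isin = [int(i) for i in ''.join(isin)]  (ValueError on a non-digit char: outside Pre_)
      match (PySem.Chars.join [] repl).mapM (fun c => PySem.Int.ofChars? [c]) with
      | none => false
      | some ds =>
        let odd_chars := pvEveryOther ds               -- isin[::2]
        let even_chars := pvEveryOther (ds.drop 1)     -- isin[1::2]
        -- the doubled half: [int(c) for c in ''.join([str(i*2) for i in …])]
        -- (.getD [] : int() on a digit of str(i*2) never raises)
        let oe :=
          if ds.length % 2 = 1 then
            (((PySem.Chars.join [] (odd_chars.map (fun i => PySem.Int.toChars (i * 2)))).mapM
                (fun c => PySem.Int.ofChars? [c])).getD [], even_chars)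
          else
            (odd_chars,
             ((PySem.Chars.join [] (even_chars.map (fun i => PySem.Int.toChars (i * 2)))).mapM
                (fun c => PySem.Int.ofChars? [c])).getD [])
        let sum_digits := (oe.1 ++ oe.2).sum           -- sum(odd_chars + even_chars)
        let mod10 := PySem.Int.mod sum_digits 10
        PySem.Int.mod (10 - mod10) 10 == checkdigit

-- ===== PORT B =====
def check_isin_alt (isin : String) : Bool :=
  let s := PySem.Chars.upper isin.toList
  -- check = int(s[-1])  (IndexError / ValueError: outside Pre_)
  match PySem.List.pyGet? s (-1) with
  | none => false
  | some lastc =>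
    match PySem.Int.ofChars? [lastc] with
    | none => false
    | some check =>
      let body := PySem.List.slice s none (some (-1))  -- s[:-1]
      -- the expansion loop: the two/one appends per char become one chunk per char, flattened
      -- (same digits in the same order; int(ch) fails at the same first bad char: outside Pre_)
      match body.mapM (fun c =>
          if 65 ≤ c.toNat ∧ c.toNat ≤ 90 then
            some [PySem.Int.floordiv ((c.toNat : Int) - 55) 10,
                  PySem.Int.mod ((c.toNat : Int) - 55) 10]
          else (PySem.Int.ofChars? [c]).map (fun d => [d])) with
      | none => false
      | some chunks =>
        let digits := chunks.flatten
        -- total = 0; double = True; for d in reversed(digits): …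
        let r := digits.reverse.foldl
          (fun (st : Int × Bool) d =>
            (st.1 + (if st.2 then (if d * 2 > 9 then d * 2 - 9 else d * 2) else d), !st.2))
          ((0 : Int), true)
        PySem.Int.mod (10 - PySem.Int.mod r.1 10) 10 == check

-- ===== PRECONDITION & SPEC =====
-- Pre_ excludes exactly the inputs where A raises: the empty string (IndexError from pop()) and
-- strings whose uppercased last character is not an ASCII digit or whose other uppercased
-- characters are not ASCII digits/letters (ValueError from int()).
def Pre_check_isin (isin : String) : Prop :=
  PySem.Chars.upper isin.toList ≠ [] ∧
  (48 ≤ ((PySem.Chars.upper isin.toList).getLastD ' ').toNat ∧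
    ((PySem.Chars.upper isin.toList).getLastD ' ').toNat ≤ 57) ∧
  ((PySem.Chars.upper isin.toList).dropLast.all
    (fun c => (48 ≤ c.toNat && c.toNat ≤ 57) || (65 ≤ c.toNat && c.toNat ≤ 90))) = true
instance (isin : String) : Decidable (Pre_check_isin isin) := by unfold Pre_check_isin; infer_instance

def pvWitness_check_isin : String := "B7"

def Spec_check_isin (isin : String) (out : Bool) : Prop := out = check_isin_alt isin
instance (isin : String) (out : Bool) : Decidable (Spec_check_isin isin out) := by unfold Spec_check_isin; infer_instance

-- ===== CLAIM (what is proved, stated in full; the proofs are below) =====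
def Claim_equal_check_isin : Prop := ∀ (isin : String), Dom_check_isin isin → Pre_check_isin isin → Spec_check_isin isin (check_isin isin)

-- ===== LEMMAS AND PROOFS =====

-- the Luhn reduction of a doubled digit, and the alternating right-to-left sum
def pvRed2 (d : Int) : Int := if d * 2 > 9 then d * 2 - 9 else d * 2

def pvL : List Int → Bool → Int
  | [], _ => 0
  | d :: t, b => (if b then pvRed2 d else d) + pvL t (!b)

-- the digit chunk both programs produce for one (uppercased) character
def pvG (c : Char) : List Int :=
  if 65 ≤ c.toNat ∧ c.toNat ≤ 90 then
    [PySem.Int.floordiv ((c.toNat : Int) - 55) 10, PySem.Int.mod ((c.toNat : Int) - 55) 10]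
  else [(c.toNat : Int) - 48]

-- the digits A re-parses from str(d * 2)
def pvDD (d : Int) : List Int :=
  ((PySem.Int.toChars (d * 2)).mapM (fun c => PySem.Int.ofChars? [c])).getD []

lemma pvOfChars_digit (c : Char) (h1 : 48 ≤ c.toNat) (h2 : c.toNat ≤ 57) :
    PySem.Int.ofChars? [c] = some ((c.toNat : Int) - 48) := by
  have h : c.toNat = 48 ∨ c.toNat = 49 ∨ c.toNat = 50 ∨ c.toNat = 51 ∨ c.toNat = 52 ∨
      c.toNat = 53 ∨ c.toNat = 54 ∨ c.toNat = 55 ∨ c.toNat = 56 ∨ c.toNat = 57 := by omega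
  have hc := Char.ofNat_toNat c
  rcases h with h|h|h|h|h|h|h|h|h|h <;>
    · rw [h] at hc; rw [← hc]; decide

lemma pvLetterParse (m : Nat) (h1 : 65 ≤ m) (h2 : m ≤ 90) :
    (PySem.Int.toChars ((m : Int) - 55)).mapM (fun c => PySem.Int.ofChars? [c])
      = some [PySem.Int.floordiv ((m : Int) - 55) 10, PySem.Int.mod ((m : Int) - 55) 10] := by
  interval_cases m <;> decide

lemma pvDDsome (d : Int) (h1 : 0 ≤ d) (h2 : d ≤ 9) :
    (PySem.Int.toChars (d * 2)).mapM (fun c => PySem.Int.ofChars? [c]) = some (pvDD d) := by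
  interval_cases d <;> decide

lemma pvDDsum (d : Int) (h1 : 0 ≤ d) (h2 : d ≤ 9) : (pvDD d).sum = pvRed2 d := by
  interval_cases d <;> decide

lemma pvGBounds (c : Char)
    (h : (48 ≤ c.toNat ∧ c.toNat ≤ 57) ∨ (65 ≤ c.toNat ∧ c.toNat ≤ 90)) :
    ∀ d ∈ pvG c, 0 ≤ d ∧ d ≤ 9 := by
  unfold pvG
  rcases h with hD | hL
  · rw [if_neg (by omega)]
    intro d hd
    simp only [List.mem_singleton] at hd
    subst hd
    omega
  · rw [if_pos hL]
    have e1 : PySem.Int.floordiv ((c.toNat : Int) - 55) 10 = ((c.toNat : Int) - 55) / 10 :=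
      PySem.Int.floordiv_eq_ediv_of_pos (by norm_num)
    have e2 : PySem.Int.mod ((c.toNat : Int) - 55) 10 = ((c.toNat : Int) - 55) % 10 :=
      PySem.Int.mod_eq_emod_of_pos (by norm_num)
    intro d hd
    rw [e1, e2] at hd
    simp only [List.mem_cons, List.not_mem_nil, or_false] at hd
    rcases hd with rfl | rfl <;> omega

lemma pvMapM_some_map {α β : Type} (f : α → Option β) (g : α → β) :
    ∀ l : List α, (∀ x ∈ l, f x = some (g x)) → l.mapM f = some (l.map g) := by
  intro l
  induction l with
  | nil => intro _; rfl
  | cons x t ih =>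
    intro h
    simp [List.mapM_cons, h x (by simp), ih (fun y hy => h y (by simp [hy]))]

lemma pvMapM_flatten_map {α : Type} (f : Char → Option Int) (e : α → List Char) (g : α → List Int)
    (l : List α) (h : ∀ x ∈ l, (e x).mapM f = some (g x)) :
    ((l.map e).flatten).mapM f = some ((l.map g).flatten) := by
  induction l with
  | nil => rfl
  | cons x t ih =>
    simp only [List.map_cons, List.flatten_cons]
    rw [List.mapM_append, h x (by simp), ih (fun y hy => h y (by simp [hy]))]
    rfl

lemma pvJoinNil : ∀ parts : List (List Char), PySem.Chars.join [] parts = parts.flatten := by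
  intro parts
  induction parts with
  | nil => rfl
  | cons x t ih =>
    cases t with
    | nil => simp [PySem.Chars.join, List.intercalate, List.intersperse]
    | cons y t2 =>
      simp only [PySem.Chars.join, List.intercalate, List.intersperse] at ih ⊢
      simp only [List.flatten_cons] at ih ⊢
      rw [ih]
      simp

lemma pvEveryOther_cons (a : Int) (t : List Int) :
    pvEveryOther (a :: t) = a :: pvEveryOther (t.drop 1) := by
  cases t <;> rfl

lemma pvMemEveryOther : ∀ {l : List Int} {x : Int}, x ∈ pvEveryOther l → x ∈ l := by
  intro l
  induction l using pvEveryOther.induct with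
  | case1 => intro x h; simp [pvEveryOther] at h
  | case2 a => intro x h; simpa [pvEveryOther] using h
  | case3 a b t ih =>
    intro x h
    simp only [pvEveryOther, List.mem_cons] at h ⊢
    rcases h with h | h
    · exact Or.inl h
    · exact Or.inr (Or.inr (ih h))

lemma pvL_append (xs ys : List Int) (b : Bool) :
    pvL (xs ++ ys) b = pvL xs b + pvL ys (if xs.length % 2 = 1 then !b else b) := by
  induction xs generalizing b with
  | nil => simp [pvL]
  | cons x t ih =>
    rcases Nat.mod_two_eq_zero_or_one t.length with h2 | h2
    · have h3 : (x :: t).length % 2 = 1 := by simp only [List.length_cons]; omega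
      simp only [List.cons_append, pvL, ih, h2, h3, reduceIte, Bool.not_not]
      simp [add_assoc]
    · have h3 : (x :: t).length % 2 = 0 := by simp only [List.length_cons]; omega
      simp only [List.cons_append, pvL, ih, h2, h3, reduceIte, Bool.not_not]
      simp [add_assoc]

lemma pvKey : ∀ l : List Int,
    pvL l.reverse true =
      if l.length % 2 = 1 then
        ((pvEveryOther l).map pvRed2).sum + (pvEveryOther (l.drop 1)).sum
      else
        (pvEveryOther l).sum + ((pvEveryOther (l.drop 1)).map pvRed2).sum := by
  intro l
  induction l with
  | nil => simp [pvL, pvEveryOther]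
  | cons d t ih =>
    rw [List.reverse_cons, pvL_append, List.length_reverse]
    rcases Nat.mod_two_eq_zero_or_one t.length with h2 | h2
    · have ho : (d :: t).length % 2 = 1 := by simp only [List.length_cons]; omega
      rw [if_pos ho, h2, if_neg (by omega : ¬((0 : Nat) = 1)), ih, if_neg (by omega),
        pvEveryOther_cons]
      have hd1 : pvL [d] true = pvRed2 d := by simp [pvL]
      rw [hd1]
      simp only [List.drop_one, List.tail_cons, List.map_cons, List.sum_cons]
      omega
    · have ho : ¬((d :: t).length % 2 = 1) := by simp only [List.length_cons]; omega
      rw [if_neg ho, h2, if_pos (rfl : (1 : Nat) = 1), ih, if_pos h2, pvEveryOther_cons]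
      have hd0 : pvL [d] (!true) = d := by simp [pvL]
      rw [hd0]
      simp only [List.drop_one, List.tail_cons, List.sum_cons]
      omega

lemma pvFoldl (l : List Int) : ∀ (t0 : Int) (b0 : Bool),
    (l.foldl (fun (st : Int × Bool) d =>
        (st.1 + (if st.2 then (if d * 2 > 9 then d * 2 - 9 else d * 2) else d), !st.2))
      (t0, b0)).1 = t0 + pvL l b0 := by
  induction l with
  | nil => intro t0 b0; simp [pvL]
  | cons d t ih =>
    intro t0 b0
    simp only [List.foldl_cons, ih, pvL, pvRed2]
    ring

-- ===== VERDICT (by name: the statement is the Claim_ definition above) =====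
theorem check_isin_spec : Claim_equal_check_isin := by
  intro isin _ hpre
  obtain ⟨hne, hdig, hbody⟩ := hpre
  obtain ⟨body, lastc, hsplit⟩ : ∃ b l, b ++ [l] = PySem.Chars.upper isin.toList :=
    ⟨_, _, List.dropLast_concat_getLast hne⟩
  rw [← hsplit] at hdig hbody
  rw [List.dropLast_concat] at hbody
  replace hbody : ∀ c ∈ body, (48 ≤ c.toNat ∧ c.toNat ≤ 57) ∨ (65 ≤ c.toNat ∧ c.toNat ≤ 90) := by
    intro c hc
    simpa using List.all_eq_true.mp hbody c hc
  simp only [List.getLastD_concat] at hdig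
  -- the per-character digit chunks agree between the two programs
  have hAelem : ∀ c ∈ body,
      ((if 65 ≤ c.toNat ∧ c.toNat < 91 then PySem.Int.toChars ((c.toNat : Int) - 55)
        else [c]).mapM (fun c => PySem.Int.ofChars? [c])) = some (pvG c) := by
    intro c hc
    rcases hbody c hc with hD | hL
    · rw [if_neg (by omega)]
      unfold pvG
      rw [if_neg (by omega)]
      simp [List.mapM_cons, pvOfChars_digit c hD.1 hD.2]
    · rw [if_pos (by omega)]
      unfold pvG
      rw [if_pos hL]
      exact pvLetterParse c.toNat hL.1 hL.2
  have hA : (PySem.Chars.join [] (body.map (fun c =>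
        if 65 ≤ c.toNat ∧ c.toNat < 91 then PySem.Int.toChars ((c.toNat : Int) - 55)
        else [c]))).mapM (fun c => PySem.Int.ofChars? [c])
      = some ((body.map pvG).flatten) := by
    rw [pvJoinNil]
    exact pvMapM_flatten_map _ _ _ _ hAelem
  have hB : body.mapM (fun c =>
        if 65 ≤ c.toNat ∧ c.toNat ≤ 90 then
          some [PySem.Int.floordiv ((c.toNat : Int) - 55) 10,
                PySem.Int.mod ((c.toNat : Int) - 55) 10]
        else (PySem.Int.ofChars? [c]).map (fun d => [d])) = some (body.map pvG) := by
    apply pvMapM_some_map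
    intro c hc
    rcases hbody c hc with hD | hL
    · rw [if_neg (by omega)]
      unfold pvG
      rw [if_neg (by omega), pvOfChars_digit c hD.1 hD.2]
      rfl
    · rw [if_pos hL]
      unfold pvG
      rw [if_pos hL]
  -- the summed doubled half of A
  have hsum2 : ∀ l : List Int, (∀ d ∈ l, 0 ≤ d ∧ d ≤ 9) →
      (((PySem.Chars.join [] (l.map (fun i => PySem.Int.toChars (i * 2)))).mapM
          (fun c => PySem.Int.ofChars? [c])).getD []).sum = (l.map pvRed2).sum := by
    intro l hl
    rw [pvJoinNil,
      pvMapM_flatten_map _ _ pvDD l (fun d hd => pvDDsome d (hl d hd).1 (hl d hd).2)]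
    rw [Option.getD_some, List.sum_flatten, List.map_map]
    exact congrArg List.sum (List.map_congr_left fun d hd => pvDDsum d (hl d hd).1 (hl d hd).2)
  unfold Spec_check_isin
  simp only [check_isin, check_isin_alt]
  rw [← hsplit]
  simp only [PySem.List.pop?_last, PySem.List.pyGet?_neg_one_append_singleton,
    PySem.List.slice_to_neg_one, List.dropLast_concat,
    pvOfChars_digit lastc hdig.1 hdig.2, hA, hB]
  set D := (body.map pvG).flatten with hDdef
  have hDb : ∀ d ∈ D, 0 ≤ d ∧ d ≤ 9 := by
    intro d hd
    rw [hDdef] at hd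
    simp only [List.mem_flatten, List.mem_map] at hd
    obtain ⟨ch, ⟨c, hc, rfl⟩, hdch⟩ := hd
    exact pvGBounds c (hbody c hc) d hdch
  rw [pvFoldl]
  rw [pvKey D]
  by_cases hpar : D.length % 2 = 1
  · rw [if_pos hpar, if_pos hpar]
    rw [List.sum_append,
      hsum2 (pvEveryOther D) (fun d hd => hDb d (pvMemEveryOther hd))]
    simp
  · rw [if_neg hpar, if_neg hpar]
    rw [List.sum_append,
      hsum2 (pvEveryOther (D.drop 1)) (fun d hd => hDb d (List.mem_of_mem_drop (pvMemEveryOther hd)))]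
    simp
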